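-- pv_equiv track=rewrite | github.com/santhoshkarthigeyan/python | python program/python_lab_3.py | find_number_indices
-- ===== SOURCE A (Python) =====
-- def find_number_indices(numbers, target):
--     positive_indices = []
--     negative_indices = []
--     count = 0
--
--     for i, num in enumerate(numbers):
--         if num == target:
--             count += 1
--             positive_indices.append(i+1)
--             negative_indices.append(-len(numbers)+i+1)
--
--     return count, positive_indices, negative_indices
-- ===== SOURCE B (Python) =====
-- def find_number_indices(numbers, target):
--     n = len(numbers)
--     positive = []
--     start = 0
--     while True:
--         try:
--             j = numbers.index(target, start)
--         except ValueError:
--             break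
--         positive.append(j + 1)
--         start = j + 1
--     return len(positive), positive, [p - n for p in positive]
-- ===== Notes on version B (the rewrite author's own statement) =====
-- stated objective: alternative
-- what changed: Replaces the enumerate loop with three accumulators by a skip-scan that repeatedly calls list.index(target, start) to jump from match to match, collecting only positive positions; count and the negative indices are then derived from that collected list (its length, and p - len(numbers)).
import Mathlib
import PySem

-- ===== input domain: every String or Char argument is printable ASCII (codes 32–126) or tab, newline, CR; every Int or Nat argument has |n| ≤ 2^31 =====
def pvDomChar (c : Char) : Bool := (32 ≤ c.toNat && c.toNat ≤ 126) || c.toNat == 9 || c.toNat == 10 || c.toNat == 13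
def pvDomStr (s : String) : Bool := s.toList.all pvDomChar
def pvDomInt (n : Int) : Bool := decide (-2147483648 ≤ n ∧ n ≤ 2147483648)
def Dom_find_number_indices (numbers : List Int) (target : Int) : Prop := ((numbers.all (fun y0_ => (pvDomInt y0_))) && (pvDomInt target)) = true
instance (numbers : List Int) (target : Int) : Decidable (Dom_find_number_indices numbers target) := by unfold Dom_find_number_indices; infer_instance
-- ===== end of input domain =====

-- ===== PORT A =====
-- B replaces A's enumerate loop over three accumulators by a skip-scan with repeated
-- list.index(target, start), deriving count and negative indices from the collected positions.
def find_number_indices (numbers : List Int) (target : Int) : Int × List Int × List Int :=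
  let n : Int := numbers.length
  (PySem.List.enumerate numbers 0).foldl
    (fun acc p =>
      if p.2 == target then (acc.1 + 1, acc.2.1 ++ [p.1 + 1], acc.2.2 ++ [-n + p.1 + 1])
      else acc)
    (0, [], [])

-- ===== PORT B =====
-- the while-loop: numbers.index(target, start) is index? on the suffix from start
-- (fuel = numbers.length + 1 only makes the recursion total; the loop body is Source B's)
def fniScan (numbers : List Int) (target : Int) : Nat → Nat → List Int → List Int
  | 0, _, pos => pos
  | fuel + 1, start, pos =>
    match PySem.List.index? (numbers.drop start) target with
    | none => pos
    | some k => fniScan numbers target fuel (start + k + 1) (pos ++ [((start : Int) + (k : Int) + 1)])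

def find_number_indices_alt (numbers : List Int) (target : Int) : Int × List Int × List Int :=
  let n : Int := numbers.length
  let pos := fniScan numbers target (numbers.length + 1) 0 []
  ((pos.length : Int), pos, pos.map (fun p => p - n))

-- ===== PRECONDITION & SPEC =====
def Spec_find_number_indices (numbers : List Int) (target : Int) (out : Int × List Int × List Int) : Prop := out = find_number_indices_alt numbers target
instance (numbers : List Int) (target : Int) (out : Int × List Int × List Int) : Decidable (Spec_find_number_indices numbers target out) := by unfold Spec_find_number_indices; infer_instance

-- ===== CLAIM (what is proved, stated in full; the proofs are below) =====
def Claim_equal_find_number_indices : Prop := ∀ (numbers : List Int) (target : Int), Dom_find_number_indices numbers target → Spec_find_number_indices numbers target (find_number_indices numbers target)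

-- ===== LEMMAS AND PROOFS =====

-- reference list of (1-based) match positions, used to characterise both ports
def fniMatches (target : Int) : List Int → Int → List Int
  | [], _ => []
  | x :: xs, i => if x == target then (i + 1) :: fniMatches target xs (i + 1) else fniMatches target xs (i + 1)

theorem fni_loop (target n : Int) (l : List (Int × Int)) :
    ∀ (c : Int) (ps ns : List Int),
    l.foldl (fun acc p =>
        if p.2 == target then (acc.1 + 1, acc.2.1 ++ [p.1 + 1], acc.2.2 ++ [-n + p.1 + 1])
        else acc) (c, ps, ns)
    = (c + (l.filterMap (fun p => if p.2 == target then some (p.1 + 1) else none)).length,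
       ps ++ l.filterMap (fun p => if p.2 == target then some (p.1 + 1) else none),
       ns ++ (l.filterMap (fun p => if p.2 == target then some (p.1 + 1) else none)).map
               (fun p => p - n)) := by
  induction l with
  | nil => simp
  | cons hd tl ih =>
    intro c ps ns
    simp only [beq_iff_eq] at ih
    rcases eq_or_ne hd.2 target with h | h
    · simp only [List.foldl_cons, List.filterMap_cons, List.map_cons, beq_iff_eq, if_pos h]
      rw [ih]
      refine Prod.ext ?_ (Prod.ext ?_ ?_)
      · simp only [List.length_cons]; push_cast; ring
      · simp
      · simp only [List.append_assoc, List.singleton_append]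
        congr 2
        ring
    · simp only [List.foldl_cons, List.filterMap_cons, beq_iff_eq, if_neg h]
      exact ih c ps ns

theorem fni_filterMap_eq_matches (target : Int) (xs : List Int) : ∀ (i : Int),
    (PySem.List.enumerate xs i).filterMap (fun p => if p.2 == target then some (p.1 + 1) else none)
      = fniMatches target xs i := by
  induction xs with
  | nil => intro i; simp [fniMatches]
  | cons x xs ih =>
    intro i
    simp only [beq_iff_eq] at ih
    rcases eq_or_ne x target with h | h
    · simp [PySem.List.enumerate_cons, h, fniMatches, ih]
    · simp [PySem.List.enumerate_cons, h, fniMatches, ih]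

theorem fni_matches_of_not_mem (target : Int) (xs : List Int) (h : target ∉ xs) : ∀ (i : Int),
    fniMatches target xs i = [] := by
  induction xs with
  | nil => intro i; rfl
  | cons x xs ih =>
    intro i
    simp only [List.mem_cons, not_or] at h
    simp [fniMatches, beq_iff_eq, Ne.symm h.1, ih h.2]

theorem fni_matches_split (target : Int) (pre : List Int) (hpre : target ∉ pre) :
    ∀ (suf : List Int) (i : Int),
    fniMatches target (pre ++ target :: suf) i
      = (i + (pre.length : Int) + 1) :: fniMatches target suf (i + (pre.length : Int) + 1) := by
  induction pre with
  | nil => intro suf i; simp [fniMatches]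
  | cons x pre ih =>
    intro suf i
    simp only [List.mem_cons, not_or] at hpre
    simp only [List.cons_append, fniMatches, beq_iff_eq, if_neg (Ne.symm hpre.1)]
    rw [ih hpre.2]
    have hc : i + 1 + (pre.length : Int) + 1 = i + ((x :: pre).length : Int) + 1 := by
      push_cast [List.length_cons]; ring
    rw [hc]

theorem fni_scan_eq (numbers : List Int) (target : Int) : ∀ (fuel start : Nat) (pos : List Int),
    numbers.length - start < fuel →
    fniScan numbers target fuel start pos
      = pos ++ fniMatches target (numbers.drop start) (start : Int) := by
  intro fuel
  induction fuel with
  | zero => intro start pos h; omega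
  | succ fuel ih =>
    intro start pos h
    unfold fniScan
    cases hidx : PySem.List.index? (numbers.drop start) target with
    | none =>
      rw [PySem.List.index?_eq_none_iff] at hidx
      simp [fni_matches_of_not_mem target _ hidx]
    | some k =>
      obtain ⟨pre, suf, hsplit, hlen, hnot⟩ := (PySem.List.index?_eq_some_iff _ _ _).mp hidx
      have hdroplen : (numbers.drop start).length = numbers.length - start := by
        simp [List.length_drop]
      have hlensplit : numbers.length - start = k + 1 + suf.length := by
        have := congrArg List.length hsplit
        simp [hlen] at this
        omega
      have hdrop2 : numbers.drop (start + k + 1) = suf := by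
        have h1 : (numbers.drop start).drop (k + 1) = suf := by
          rw [hsplit, ← hlen]
          simp [List.drop_append]
        rw [← h1, List.drop_drop]
        congr 1
      simp only []
      rw [ih (start + k + 1) _ (by omega)]
      rw [hdrop2, hsplit, fni_matches_split target pre hnot, hlen]
      push_cast
      simp

-- ===== VERDICT (by name: the statement is the Claim_ definition above) =====
theorem find_number_indices_spec : Claim_equal_find_number_indices := by
  intro numbers target _
  unfold Spec_find_number_indices find_number_indices find_number_indices_alt
  rw [fni_loop, fni_scan_eq numbers target (numbers.length + 1) 0 [] (by omega),
    List.drop_zero, Nat.cast_zero, fni_filterMap_eq_matches target numbers 0]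
  simp
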